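-- pv_equiv track=rewrite | github.com/StefanoPal/Advent-Of-Code-2022 | day9-2.py | run_action
-- ===== SOURCE A (Python) =====
-- class Axis():
--     X, Y = range(0, 2)
--
-- def is_touching(head_pos: list[int], tail_pos: list[int]) -> bool:
--     for i in [-1, 0, 1]:
--         for j in [-1, 0, 1]:
--             if(tail_pos[Axis.X] + j == head_pos[Axis.X] and tail_pos[Axis.Y] + i == head_pos[Axis.Y]):
--                 return True
--
--     return False
--
-- def run_action(direction: str, head_pos: list[int], tail_pos: list[int], is_head: bool = False) -> tuple[list[int], list[int]]:
--
--     if(is_head):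
--         if(direction == "U"):
--             head_pos[Axis.Y] -= 1
--
--         elif(direction == "D"):
--             head_pos[Axis.Y] += 1
--
--         elif(direction == "L"):
--             head_pos[Axis.X] -= 1
--
--         elif(direction == "R"):
--             head_pos[Axis.X] += 1
--
--         else:
--             raise Exception("Unknown direction")
--
--     if(is_touching(head_pos, tail_pos)):
--         return head_pos, tail_pos
--
--     # Check 2 to the right
--     if(tail_pos[Axis.X] + 2 == head_pos[Axis.X] and tail_pos[Axis.Y] == head_pos[Axis.Y]):
--         tail_pos = [tail_pos[Axis.X] + 1, tail_pos[Axis.Y]]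
--         return head_pos, tail_pos
--
--     # Check 2 to the left
--     if(tail_pos[Axis.X] - 2 == head_pos[Axis.X] and tail_pos[Axis.Y] == head_pos[Axis.Y]):
--         tail_pos = [tail_pos[Axis.X] - 1, tail_pos[Axis.Y]]
--         return head_pos, tail_pos
--
--     # Check 2 up
--     if(tail_pos[Axis.X] == head_pos[Axis.X] and tail_pos[Axis.Y] + 2 == head_pos[Axis.Y]):
--         tail_pos = [tail_pos[Axis.X], tail_pos[Axis.Y] + 1]
--         return head_pos, tail_pos
--
--     # Check 2 down
--     if(tail_pos[Axis.X] == head_pos[Axis.X] and tail_pos[Axis.Y] - 2 == head_pos[Axis.Y]):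
--         tail_pos = [tail_pos[Axis.X], tail_pos[Axis.Y] - 1]
--         return head_pos, tail_pos
--
--
--     for i in [-1, 1]:
--         for j in [-1, 1]:
--             temp_pos = [tail_pos[Axis.X] + i, tail_pos[Axis.Y] + j]
--             if(is_touching(temp_pos, head_pos)):
--                 tail_pos = temp_pos
--                 return head_pos, tail_pos
--
--     raise Exception("Error")
-- ===== SOURCE B (Python) =====
-- # Idiomatic re-implementation: same in-place head update, then one dx/dy sign computation
-- # replaces the touching scan, the four straight checks and the diagonal trial loop.
-- def run_action(direction: str, head_pos: list[int], tail_pos: list[int], is_head: bool = False) -> tuple[list[int], list[int]]: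
--     if is_head:
--         if direction == "U":
--             head_pos[1] -= 1
--         elif direction == "D":
--             head_pos[1] += 1
--         elif direction == "L":
--             head_pos[0] -= 1
--         elif direction == "R":
--             head_pos[0] += 1
--         else:
--             raise Exception("Unknown direction")
--
--     dx = head_pos[0] - tail_pos[0]
--     dy = head_pos[1] - tail_pos[1]
--     if abs(dx) <= 1 and abs(dy) <= 1:
--         return head_pos, tail_pos
--     if abs(dx) <= 2 and abs(dy) <= 2:
--         sx = (dx > 0) - (dx < 0)
--         sy = (dy > 0) - (dy < 0)
--         return head_pos, [tail_pos[0] + sx, tail_pos[1] + sy]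
--     raise Exception("Error")
-- ===== Notes on version B (the rewrite author's own statement) =====
-- stated objective: idiomatic
-- what changed: The touching scan (9-cell double loop), the four straight-move checks and the diagonal trial loop are replaced by one dx/dy difference with a sign computation: tail moves by (sign dx, sign dy) whenever max(|dx|,|dy|) is 2, stays when it is at most 1.
import Mathlib
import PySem

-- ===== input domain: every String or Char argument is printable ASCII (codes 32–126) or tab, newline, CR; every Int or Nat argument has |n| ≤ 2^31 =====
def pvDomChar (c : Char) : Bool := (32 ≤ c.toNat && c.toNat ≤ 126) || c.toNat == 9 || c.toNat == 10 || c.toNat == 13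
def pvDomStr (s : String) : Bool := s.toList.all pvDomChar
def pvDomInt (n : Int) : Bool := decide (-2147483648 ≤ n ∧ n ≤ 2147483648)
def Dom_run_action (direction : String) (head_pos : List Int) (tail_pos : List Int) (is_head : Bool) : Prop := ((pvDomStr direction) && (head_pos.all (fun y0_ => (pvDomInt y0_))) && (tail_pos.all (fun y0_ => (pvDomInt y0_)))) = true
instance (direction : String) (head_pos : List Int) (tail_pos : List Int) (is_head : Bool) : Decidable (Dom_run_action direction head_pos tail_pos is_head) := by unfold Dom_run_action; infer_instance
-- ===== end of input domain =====

-- B replaces A's touching scan, straight-move checks and diagonal trial loop by one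
-- dx/dy sign computation (idiomatic; same cost). A mutates head_pos in place in Python;
-- the equivalence proved here is about the RETURN value only.


-- ===== PORT A =====
-- list[i] for i = 0,1; Pre_ guarantees length ≥ 2, where this equals Python's xs[i]
def pvAt (xs : List Int) (i : Nat) : Int := xs.getD i 0

-- the head-update block shared verbatim by A and B (Python mutates head_pos in place);
-- the final 'else head_pos' is Python's raise Exception("Unknown direction"), excluded by Pre_
def pvHeadUpd (direction : String) (head_pos : List Int) (is_head : Bool) : List Int :=
  if is_head then
    if direction = "U" then head_pos.set 1 (pvAt head_pos 1 - 1)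
    else if direction = "D" then head_pos.set 1 (pvAt head_pos 1 + 1)
    else if direction = "L" then head_pos.set 0 (pvAt head_pos 0 - 1)
    else if direction = "R" then head_pos.set 0 (pvAt head_pos 0 + 1)
    else head_pos
  else head_pos

-- A's is_touching: double loop over [-1,0,1] with early return True = any
def is_touching_port (head_pos tail_pos : List Int) : Bool :=
  ([-1, 0, 1] : List Int).any (fun i => ([-1, 0, 1] : List Int).any (fun j =>
    decide (pvAt tail_pos 0 + j = pvAt head_pos 0 ∧ pvAt tail_pos 1 + i = pvAt head_pos 1)))

-- A's body after the head update; the 'none' arm is Python's raise Exception("Error"), excluded by Pre_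
def pvTailA (head tail_pos : List Int) : List Int × List Int :=
  if is_touching_port head tail_pos then (head, tail_pos)
  else if pvAt tail_pos 0 + 2 = pvAt head 0 ∧ pvAt tail_pos 1 = pvAt head 1 then
    (head, [pvAt tail_pos 0 + 1, pvAt tail_pos 1])
  else if pvAt tail_pos 0 - 2 = pvAt head 0 ∧ pvAt tail_pos 1 = pvAt head 1 then
    (head, [pvAt tail_pos 0 - 1, pvAt tail_pos 1])
  else if pvAt tail_pos 0 = pvAt head 0 ∧ pvAt tail_pos 1 + 2 = pvAt head 1 then
    (head, [pvAt tail_pos 0, pvAt tail_pos 1 + 1])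
  else if pvAt tail_pos 0 = pvAt head 0 ∧ pvAt tail_pos 1 - 2 = pvAt head 1 then
    (head, [pvAt tail_pos 0, pvAt tail_pos 1 - 1])
  else
    match (([-1, 1] : List Int).flatMap (fun i => ([-1, 1] : List Int).map (fun j => (i, j)))).find?
        (fun p => is_touching_port [pvAt tail_pos 0 + p.1, pvAt tail_pos 1 + p.2] head) with
    | some p => (head, [pvAt tail_pos 0 + p.1, pvAt tail_pos 1 + p.2])
    | none => (head, tail_pos)

def run_action (direction : String) (head_pos : List Int) (tail_pos : List Int) (is_head : Bool) : List Int × List Int :=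
  pvTailA (pvHeadUpd direction head_pos is_head) tail_pos

-- ===== PORT B =====
-- B's body after the head update; the final arm is Python's raise Exception("Error"), excluded by Pre_
def pvTailB (head tail_pos : List Int) : List Int × List Int :=
  let dx := pvAt head 0 - pvAt tail_pos 0
  let dy := pvAt head 1 - pvAt tail_pos 1
  if dx.natAbs ≤ 1 ∧ dy.natAbs ≤ 1 then (head, tail_pos)
  else if dx.natAbs ≤ 2 ∧ dy.natAbs ≤ 2 then
    let sx := (if 0 < dx then (1 : Int) else 0) - (if dx < 0 then (1 : Int) else 0)
    let sy := (if 0 < dy then (1 : Int) else 0) - (if dy < 0 then (1 : Int) else 0)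
    (head, [pvAt tail_pos 0 + sx, pvAt tail_pos 1 + sy])
  else (head, tail_pos)

def run_action_alt (direction : String) (head_pos : List Int) (tail_pos : List Int) (is_head : Bool) : List Int × List Int :=
  pvTailB (pvHeadUpd direction head_pos is_head) tail_pos

-- ===== PRECONDITION & SPEC =====
-- Pre_ excludes exactly the inputs where Python A raises: lists shorter than 2 (IndexError),
-- is_head with a direction outside U/D/L/R (Exception "Unknown direction"), and a post-update
-- head more than 2 away from the tail on either axis (Exception "Error").
def Pre_run_action (direction : String) (head_pos : List Int) (tail_pos : List Int) (is_head : Bool) : Prop :=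
  2 ≤ head_pos.length ∧ 2 ≤ tail_pos.length ∧
  (is_head = true → direction = "U" ∨ direction = "D" ∨ direction = "L" ∨ direction = "R") ∧
  (pvAt (pvHeadUpd direction head_pos is_head) 0 - pvAt tail_pos 0).natAbs ≤ 2 ∧
  (pvAt (pvHeadUpd direction head_pos is_head) 1 - pvAt tail_pos 1).natAbs ≤ 2
instance (direction : String) (head_pos : List Int) (tail_pos : List Int) (is_head : Bool) : Decidable (Pre_run_action direction head_pos tail_pos is_head) := by unfold Pre_run_action; infer_instance

def pvWitness_run_action : String × List Int × List Int × Bool := ("U", [0, 2], [0, 0], true)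

def Spec_run_action (direction : String) (head_pos : List Int) (tail_pos : List Int) (is_head : Bool) (out : List Int × List Int) : Prop := out = run_action_alt direction head_pos tail_pos is_head
instance (direction : String) (head_pos : List Int) (tail_pos : List Int) (is_head : Bool) (out : List Int × List Int) : Decidable (Spec_run_action direction head_pos tail_pos is_head out) := by unfold Spec_run_action; infer_instance

-- ===== CLAIM (what is proved, stated in full; the proofs are below) =====
def Claim_equal_run_action : Prop := ∀ (direction : String) (head_pos : List Int) (tail_pos : List Int) (is_head : Bool), Dom_run_action direction head_pos tail_pos is_head → Pre_run_action direction head_pos tail_pos is_head → Spec_run_action direction head_pos tail_pos is_head (run_action direction head_pos tail_pos is_head)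

-- ===== LEMMAS AND PROOFS =====
-- core: after the (shared) head update, A's and B's tail computations coincide
-- whenever the head is within distance 2 of the tail on both axes
set_option maxHeartbeats 1000000 in
lemma pvTail_eq (a b c d : Int) (hr tr : List Int)
    (hdx : (a - c).natAbs ≤ 2) (hdy : (b - d).natAbs ≤ 2) :
    pvTailA (a :: b :: hr) (c :: d :: tr) = pvTailB (a :: b :: hr) (c :: d :: tr) := by
  obtain ⟨e, f, ha, hb, he1, he2, hf1, hf2⟩ :
      ∃ e f : Int, a = c + e ∧ b = d + f ∧ -2 ≤ e ∧ e ≤ 2 ∧ -2 ≤ f ∧ f ≤ 2 :=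
    ⟨a - c, b - d, by omega, by omega, by omega, by omega, by omega, by omega⟩
  subst ha hb
  interval_cases e <;> interval_cases f <;>
    simp [pvTailA, pvTailB, is_touching_port, pvAt, add_assoc, sub_eq_add_neg]

theorem pvHeadUpd_shape (direction : String) (a b : Int) (hr : List Int) (is_head : Bool) :
    ∃ a' b', pvHeadUpd direction (a :: b :: hr) is_head = a' :: b' :: hr := by
  unfold pvHeadUpd pvAt
  split_ifs <;> exact ⟨_, _, rfl⟩

-- ===== VERDICT (by name: the statement is the Claim_ definition above) =====
theorem run_action_spec : Claim_equal_run_action := by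
  intro direction head_pos tail_pos is_head _ hpre
  obtain ⟨hhl, htl, _, hdx, hdy⟩ := hpre
  unfold Spec_run_action run_action run_action_alt
  match head_pos, hhl with
  | a :: b :: hr, _ =>
  match tail_pos, htl with
  | c :: d :: tr, _ =>
  obtain ⟨a', b', hshape⟩ := pvHeadUpd_shape direction a b hr is_head
  rw [hshape] at hdx hdy ⊢
  simp only [pvAt, List.getD, List.getElem?_cons_zero, List.getElem?_cons_succ,
    Option.getD_some] at hdx hdy
  exact pvTail_eq a' b' c d hr tr hdx hdy
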